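-- pv_equiv track=rewrite | github.com/pistolinkr/VisionAI2025Pro | src/models/zero_shot_classifier.py | _filter_and_clean_words
-- ===== SOURCE A (Python) =====
-- from typing import List, Dict, Tuple, Optional
--
-- def _filter_and_clean_words(words: List[str]) -> List[str]:
--     """단어 필터링 및 정제"""
--     filtered_words = []
--
--     for word in words:
--         # 기본 필터링
--         if len(word) < 2 or len(word) > 50:  # 너무 짧거나 긴 단어 제외
--             continue
--
--         # 특수문자만 있는 단어 제외
--         if not any(c.isalpha() for c in word):
--             continue
--
--         # 숫자로만 된 단어 제외
--         if word.isdigit():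
--             continue
--
--         # 알파벳과 숫자만 포함된 단어만 허용
--         if word.replace('-', '').replace('_', '').isalnum():
--             filtered_words.append(word.lower())
--
--     # 중복 제거
--     unique_words = list(set(filtered_words))
--
--     # 의미있는 카테고리 우선순위
--     priority_categories = [
--         "person", "people", "human", "man", "woman", "child", "baby",
--         "animal", "dog", "cat", "bird", "fish", "horse", "cow", "sheep", "pig",
--         "vehicle", "car", "truck", "bus", "train", "airplane", "boat", "bicycle",
--         "building", "house", "office", "school", "hospital", "church", "tower",
--         "nature", "tree", "flower", "mountain", "ocean", "river", "forest",
--         "food", "fruit", "vegetable", "meat", "bread", "cake", "pizza",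
--         "object", "table", "chair", "bed", "lamp", "phone", "computer",
--         "technology", "computer", "phone", "camera", "television", "radio",
--         "art", "painting", "sculpture", "music", "instrument", "book",
--         "sport", "football", "basketball", "tennis", "swimming",
--         "clothing", "shirt", "pants", "dress", "shoes", "hat"
--     ]
--
--     # 우선순위 카테고리를 앞에 배치
--     final_categories = []
--     for priority in priority_categories:
--         if priority in unique_words:
--             final_categories.append(priority)
--             unique_words.remove(priority)
--
--     # 나머지 카테고리 추가 (모든 단어 사용)
--     final_categories.extend(unique_words)
--
--     return final_categories
-- ===== SOURCE B (Python) =====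
-- from typing import List
--
-- _PRIORITY_CATEGORIES = [
--     "person", "people", "human", "man", "woman", "child", "baby",
--     "animal", "dog", "cat", "bird", "fish", "horse", "cow", "sheep", "pig",
--     "vehicle", "car", "truck", "bus", "train", "airplane", "boat", "bicycle",
--     "building", "house", "office", "school", "hospital", "church", "tower",
--     "nature", "tree", "flower", "mountain", "ocean", "river", "forest",
--     "food", "fruit", "vegetable", "meat", "bread", "cake", "pizza",
--     "object", "table", "chair", "bed", "lamp", "phone", "computer",
--     "technology", "computer", "phone", "camera", "television", "radio",
--     "art", "painting", "sculpture", "music", "instrument", "book",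
--     "sport", "football", "basketball", "tennis", "swimming",
--     "clothing", "shirt", "pants", "dress", "shoes", "hat"
-- ]
--
--
-- def _keep(word: str) -> bool:
--     return (2 <= len(word) <= 50
--             and any(c.isalpha() for c in word)
--             and not word.isdigit()
--             and word.replace('-', '').replace('_', '').isalnum())
--
--
-- def _filter_and_clean_words(words: List[str]) -> List[str]:
--     unique_words = list({w.lower() for w in words if _keep(w)})
--     rank = {}
--     for i, p in enumerate(_PRIORITY_CATEGORIES):
--         rank.setdefault(p, i)
--     n = len(_PRIORITY_CATEGORIES)
--     # stable sort: priority words first in first-occurrence order,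
--     # the remaining words keep their relative order
--     return sorted(unique_words, key=lambda w: rank.get(w, n))
-- ===== Notes on version B (the rewrite author's own statement) =====
-- stated objective: alternative
-- what changed: A's second phase scans the 75-entry priority list and, for each hit, does an O(n) membership test and list.remove on the deduplicated word list; B instead builds a first-occurrence rank table with setdefault and performs one stable sort of the deduplicated words keyed by rank (missing words rank last), so the scan-and-remove loop disappears.
import Mathlib
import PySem

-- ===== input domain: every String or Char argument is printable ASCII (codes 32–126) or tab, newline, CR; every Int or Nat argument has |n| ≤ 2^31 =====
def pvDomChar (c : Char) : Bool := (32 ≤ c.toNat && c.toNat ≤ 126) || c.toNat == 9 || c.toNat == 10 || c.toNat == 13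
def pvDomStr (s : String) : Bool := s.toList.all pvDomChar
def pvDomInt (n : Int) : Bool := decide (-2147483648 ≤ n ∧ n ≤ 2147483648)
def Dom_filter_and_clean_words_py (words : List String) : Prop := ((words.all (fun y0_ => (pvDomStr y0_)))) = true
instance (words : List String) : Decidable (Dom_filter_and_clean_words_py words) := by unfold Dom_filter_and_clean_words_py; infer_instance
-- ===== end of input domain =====

set_option maxRecDepth 16384


-- B replaces A's scan-priorities-and-remove two-phase build by a first-occurrence rank
-- table plus one stable sort of the deduplicated words (objective: alternative, same result).

-- ===== PORT A =====
-- module-level constant shared by both ports (the literal list from the Python source)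
def priority_categories_py : List String :=
  ["person", "people", "human", "man", "woman", "child", "baby", "animal", "dog", "cat", "bird",
   "fish", "horse", "cow", "sheep", "pig", "vehicle", "car", "truck", "bus", "train", "airplane",
   "boat", "bicycle", "building", "house", "office", "school", "hospital", "church", "tower", "nature",
   "tree", "flower", "mountain", "ocean", "river", "forest", "food", "fruit", "vegetable", "meat",
   "bread", "cake", "pizza", "object", "table", "chair", "bed", "lamp", "phone", "computer",
   "technology", "computer", "phone", "camera", "television", "radio", "art", "painting", "sculpture",
   "music", "instrument", "book", "sport", "football", "basketball", "tennis", "swimming", "clothing",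
   "shirt", "pants", "dress", "shoes", "hat"]

def filter_and_clean_words_py (words : List String) : List String :=
  -- filtering loop (the three `continue`s become nested ifs keeping acc)
  let filtered_words := words.foldl (fun acc word =>
    if PySem.Str.len word < 2 ∨ PySem.Str.len word > 50 then acc
    else if ¬ (word.toList.any PySem.Chars.isalpha) then acc
    else if PySem.Str.strIsdigit word then acc
    else if PySem.Str.strIsalnum (PySem.Str.replace (PySem.Str.replace word "-" "") "_" "") then
      acc ++ [PySem.Str.lower word]
    else acc) []
  -- unique_words = list(set(filtered_words))
  let unique_words : List String := PySem.Set.ofList filtered_words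
  -- for priority in priority_categories: if priority in unique_words: append + remove
  let st := priority_categories_py.foldl
    (fun (st : List String × List String) priority =>
      if st.2.contains priority then
        (st.1 ++ [priority], (PySem.List.remove? st.2 priority).getD st.2)
      else st) (([] : List String), unique_words)
  st.1 ++ st.2

-- ===== PORT B =====
def pv_keep (word : String) : Bool :=
  decide (2 ≤ PySem.Str.len word) && decide (PySem.Str.len word ≤ 50)
  && word.toList.any PySem.Chars.isalpha
  && !PySem.Str.strIsdigit word
  && PySem.Str.strIsalnum (PySem.Str.replace (PySem.Str.replace word "-" "") "_" "")

def filter_and_clean_words_py_alt (words : List String) : List String :=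
  -- unique_words = list({w.lower() for w in words if _keep(w)})
  let unique_words : List String :=
    PySem.Set.ofList ((words.filter pv_keep).map PySem.Str.lower)
  -- rank = {}; for i, p in enumerate(priority_categories): rank.setdefault(p, i)
  let rank : PySem.Dict String Int :=
    (PySem.List.enumerate priority_categories_py).foldl
      (fun d ip => d.setdefault ip.2 ip.1) PySem.Dict.empty
  let n : Int := PySem.List.len priority_categories_py
  -- sorted(unique_words, key=lambda w: rank.get(w, n)) — stable sort
  PySem.List.sorted unique_words (fun w => rank.getD w n) false

-- ===== PRECONDITION & SPEC =====
def Spec_filter_and_clean_words_py (words : List String) (out : List String) : Prop := out = filter_and_clean_words_py_alt words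
instance (words : List String) (out : List String) : Decidable (Spec_filter_and_clean_words_py words out) := by unfold Spec_filter_and_clean_words_py; infer_instance

-- ===== CLAIM (what is proved, stated in full; the proofs are below) =====
def Claim_equal_filter_and_clean_words_py : Prop := ∀ (words : List String), Dom_filter_and_clean_words_py words → Spec_filter_and_clean_words_py words (filter_and_clean_words_py words)

-- ===== LEMMAS AND PROOFS =====

-- abbreviations for B's rank table and key
def pvRank : PySem.Dict String Int :=
  (PySem.List.enumerate priority_categories_py).foldl
    (fun d ip => d.setdefault ip.2 ip.1) PySem.Dict.empty

def pvN : Int := PySem.List.len priority_categories_py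

def pvKey (w : String) : Int := pvRank.getD w pvN

-- first-occurrence deduplication of a list (proof-side tool)
def pvDD : List String → List String
  | [] => []
  | p :: ps => p :: (pvDD ps).filter (fun q => q ≠ p)

def pvL : List String := pvDD priority_categories_py

-- A's priority-selection loop, as a recursion over the priority list
def pvSel : List String → List String → List String
  | [], _ => []
  | p :: ps, u => if u.contains p then p :: pvSel ps (u.erase p) else pvSel ps u

-- small Bool helpers
theorem pv_beq_comm (a b : String) : (a == b) = (b == a) := by
  by_cases h : a = b
  · subst h; rfl
  · cases ha : a == b with
    | true => exact absurd (eq_of_beq ha) h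
    | false =>
      cases hb : b == a with
      | true => exact absurd (eq_of_beq hb).symm h
      | false => rfl

theorem pv_contains_true {l : List String} {a : String} (h : a ∈ l) : l.contains a = true :=
  List.contains_iff_mem.mpr h

theorem pv_not_true {b : Bool} (h : b = false) : ¬ b = true := by simp [h]

-- erase on a Nodup list is a filter
theorem pv_erase_eq_filter : ∀ (u : List String), u.Nodup → ∀ (p : String),
    u.erase p = u.filter (fun x => x ≠ p) := by
  intro u
  induction u with
  | nil => intro _ p; rfl
  | cons x xs ih =>
    intro hu p
    obtain ⟨hx, hxs⟩ := List.nodup_cons.mp hu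
    rw [List.erase_cons, List.filter_cons]
    by_cases hxp : x = p
    · subst hxp
      rw [if_pos (by simp), if_neg (by simp)]
      exact (List.filter_eq_self.mpr (fun a ha => by
        simp only [ne_eq, decide_eq_true_eq]
        exact fun e => hx (e ▸ ha))).symm
    · rw [if_neg (by simp [hxp]), if_pos (by simp [hxp]), ih hxs p]

-- remove? of a present element returns `some (erase)`
theorem pv_idxOf? : ∀ (u : List String) (p : String), p ∈ u →
    List.idxOf? p u = some (u.idxOf p) := by
  intro u p
  induction u with
  | nil => intro h; cases h
  | cons x xs ih =>
    intro h
    by_cases hxp : x = p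
    · subst hxp
      simp [List.idxOf?, List.findIdx?_cons, List.idxOf, List.findIdx_cons]
    · have hb : (x == p) = false := by
        cases hv : x == p with
        | false => rfl
        | true => exact absurd (eq_of_beq hv) hxp
      have hmem : p ∈ xs := by
        rcases List.mem_cons.mp h with e | hm
        · exact absurd e.symm hxp
        · exact hm
      rw [show List.idxOf? p (x :: xs) = (List.idxOf? p xs).map (· + 1) from by
            simp [List.idxOf?, List.findIdx?_cons, hb]]
      rw [ih hmem]
      simp [List.idxOf, List.findIdx_cons, hb]

theorem pv_remove_some (u : List String) (p : String) (h : p ∈ u) :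
    PySem.List.remove? u p = some (u.erase p) := by
  simp only [PySem.List.remove?]
  rw [pv_idxOf? u p h]
  simp [List.eraseIdx_idxOf_eq_erase]

-- characterisation of A's fold over the priority list
theorem pv_Aloop (P' : List String) : ∀ (acc u : List String), u.Nodup →
    P'.foldl (fun (st : List String × List String) priority =>
      if st.2.contains priority then
        (st.1 ++ [priority], (PySem.List.remove? st.2 priority).getD st.2)
      else st) (acc, u)
    = (acc ++ pvSel P' u, u.filter (fun w => !P'.contains w)) := by
  induction P' with
  | nil => intro acc u _; simp [pvSel]
  | cons p ps ih =>
    intro acc u hu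
    rw [List.foldl_cons]
    by_cases hc : u.contains p = true
    · have hmem : p ∈ u := List.contains_iff_mem.mp hc
      rw [if_pos hc, pv_remove_some u p hmem, Option.getD_some,
          ih (acc ++ [p]) (u.erase p) (hu.erase p)]
      refine Prod.ext ?_ ?_
      · show (acc ++ [p]) ++ pvSel ps (u.erase p) = acc ++ pvSel (p :: ps) u
        simp [pvSel, hmem, List.append_assoc]
      · show (u.erase p).filter (fun w => !ps.contains w)
            = u.filter (fun w => !(p :: ps).contains w)
        rw [pv_erase_eq_filter u hu p, List.filter_filter]
        apply List.filter_congr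
        intro x _
        by_cases hxp : x = p <;> simp [hxp]
    · have hpnot : p ∉ u := fun hm => hc (pv_contains_true hm)
      rw [if_neg hc, ih acc u hu]
      refine Prod.ext ?_ ?_
      · show acc ++ pvSel ps u = acc ++ pvSel (p :: ps) u
        simp [pvSel, hpnot]
      · show u.filter (fun w => !ps.contains w) = u.filter (fun w => !(p :: ps).contains w)
        apply List.filter_congr
        intro x hx
        have hxp : x ≠ p := fun e => hpnot (e ▸ hx)
        simp [hxp]

theorem pv_mem_dd (P' : List String) (x : String) : x ∈ pvDD P' ↔ x ∈ P' := by
  induction P' with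
  | nil => simp [pvDD]
  | cons p ps ih =>
    by_cases hxp : x = p <;> simp [pvDD, List.mem_filter, hxp, ih]

-- pvSel in terms of first-occurrence dedup
theorem pv_sel_eq_dd (P' : List String) : ∀ (u : List String), u.Nodup →
    pvSel P' u = (pvDD P').filter (fun q => u.contains q) := by
  induction P' with
  | nil => intro u _; simp [pvSel, pvDD]
  | cons p ps ih =>
    intro u hu
    by_cases hmem : p ∈ u
    · rw [show pvSel (p :: ps) u = p :: pvSel ps (u.erase p) from by simp [pvSel, hmem]]
      rw [ih (u.erase p) (hu.erase p)]
      rw [show pvDD (p :: ps) = p :: (pvDD ps).filter (fun q => q ≠ p) from rfl]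
      rw [List.filter_cons_of_pos (pv_contains_true hmem), List.filter_filter]
      congr 1
      apply List.filter_congr
      intro q _
      by_cases hqp : q = p
      · subst hqp
        simp [List.Nodup.mem_erase_iff hu]
      · simp [List.Nodup.mem_erase_iff hu, hqp]
    · rw [show pvSel (p :: ps) u = pvSel ps u from by simp [pvSel, hmem]]
      rw [ih u hu]
      rw [show pvDD (p :: ps) = p :: (pvDD ps).filter (fun q => q ≠ p) from rfl]
      rw [List.filter_cons_of_neg (by simp [hmem]), List.filter_filter]
      apply List.filter_congr
      intro q _
      by_cases hqp : q = p
      · subst hqp; simp [hmem]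
      · simp [hqp]

-- rank-table facts -------------------------------------------------------

theorem pv_fold_contains (l : List (Int × String)) : ∀ (d : PySem.Dict String Int) (w : String),
    ((l.foldl (fun d ip => d.setdefault ip.2 ip.1) d).contains w)
      = (d.contains w || l.any (fun ip => ip.2 == w)) := by
  induction l with
  | nil => intro d w; simp
  | cons ip l ih =>
    intro d w
    rw [List.foldl_cons, ih, PySem.Dict.contains_setdefault, List.any_cons, pv_beq_comm]
    cases hb : (ip.2 == w) <;> cases hd : d.contains w <;> simp

theorem pv_enumerate_any (P' : List String) (w : String) : ∀ (s : Int),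
    ((PySem.List.enumerate P' s).any (fun ip => ip.2 == w)) = P'.contains w := by
  induction P' with
  | nil => intro s; simp [PySem.List.enumerate_nil]
  | cons x xs ih =>
    intro s
    rw [PySem.List.enumerate_cons, List.any_cons, ih, List.contains_cons, pv_beq_comm]

theorem pv_rank_contains (w : String) :
    pvRank.contains w = priority_categories_py.contains w := by
  unfold pvRank
  rw [pv_fold_contains, pv_enumerate_any priority_categories_py w 0,
      PySem.Dict.contains_empty, Bool.false_or]

theorem pv_key_of_not_mem (w : String) (h : priority_categories_py.contains w = false) :
    pvKey w = pvN := by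
  unfold pvKey
  exact PySem.Dict.getD_of_not_contains pvRank pvN (by rw [pv_rank_contains, h])

theorem pv_values_lt : ∀ v ∈ pvRank.values, v < pvN := by decide

theorem pv_key_lt_of_mem (w : String) (h : priority_categories_py.contains w = true) :
    pvKey w < pvN := by
  have hc : pvRank.contains w = true := by rw [pv_rank_contains, h]
  rw [PySem.Dict.contains_eq_isSome_get?] at hc
  obtain ⟨v, hv⟩ := Option.isSome_iff_exists.mp hc
  have hk : pvKey w = v := PySem.Dict.getD_of_get?_eq_some pvRank pvN hv
  rw [hk]
  have hitems := PySem.Dict.mem_items_of_get?_eq_some pvRank hv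
  exact pv_values_lt v (by
    simp only [PySem.Dict.values]
    exact List.mem_map_of_mem hitems)

theorem pv_key_list : pvL.map pvKey =
    [(0 : Int), 1, 2, 3, 4, 5, 6, 7, 8, 9, 10, 11, 12, 13, 14, 15, 16, 17, 18, 19, 20, 21, 22,
     23, 24, 25, 26, 27, 28, 29, 30, 31, 32, 33, 34, 35, 36, 37, 38, 39, 40, 41, 42, 43, 44, 45,
     46, 47, 48, 49, 50, 51, 52, 55, 56, 57, 58, 59, 60, 61, 62, 63, 64, 65, 66, 67, 68, 69, 70,
     71, 72, 73, 74] := by decide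

theorem pv_pairwise : pvL.Pairwise (fun a b => pvKey a < pvKey b) := by
  have hm : (pvL.map pvKey).Pairwise (· < ·) := by rw [pv_key_list]; decide
  exact List.pairwise_map.mp hm

-- insertion lemmas -------------------------------------------------------

theorem pv_insertBy_cons {α : Type} (before : α → α → Bool) (x y : α) (ys : List α) :
    PySem.List.insertBy before x (y :: ys)
      = if before x y then x :: y :: ys else y :: PySem.List.insertBy before x ys := rfl

theorem pv_insertBy_all_before {α : Type} (before : α → α → Bool) (x : α) (l : List α)
    (h : ∀ y ∈ l, before x y = true) :
    PySem.List.insertBy before x l = x :: l := by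
  cases l with
  | nil => rfl
  | cons y ys => rw [pv_insertBy_cons, if_pos (h y (by simp))]

theorem pv_insertBy_split {α : Type} (before : α → α → Bool) (x : α) (ps qs : List α)
    (h : ∀ q ∈ qs, before x q = true) :
    PySem.List.insertBy before x (ps ++ qs) = PySem.List.insertBy before x ps ++ qs := by
  induction ps with
  | nil =>
    cases qs with
    | nil => rfl
    | cons q qs' =>
      rw [List.nil_append, pv_insertBy_cons, if_pos (h q (by simp))]
      rfl
  | cons p ps' ih =>
    rw [List.cons_append, pv_insertBy_cons, pv_insertBy_cons]
    by_cases hb : before x p = true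
    · rw [if_pos hb, if_pos hb, List.cons_append, List.cons_append]
    · rw [if_neg hb, if_neg hb, ih, List.cons_append]

theorem pv_insert_filter (x : String) (u : List String) (hx : x ∉ u) :
    ∀ (L' : List String), L'.Pairwise (fun a b => pvKey a < pvKey b) → x ∈ L' →
    PySem.List.insertBy (fun a b => decide (pvKey a < pvKey b)) x (L'.filter (fun q => u.contains q))
      = L'.filter (fun q => (u ++ [x]).contains q) := by
  intro L'
  induction L' with
  | nil => intro _ h; cases h
  | cons h t ih =>
    intro hp hmem
    obtain ⟨hht, hpt⟩ := List.pairwise_cons.mp hp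
    by_cases hhx : h = x
    · subst hhx
      have hxt : h ∉ t := fun hm => lt_irrefl _ (hht h hm)
      rw [List.filter_cons_of_neg (by simp [hx]),
          List.filter_cons_of_pos (by simp),
          pv_insertBy_all_before _ _ _ (fun y hy => by
            simp only [decide_eq_true_eq]
            exact hht y (List.mem_filter.mp hy).1)]
      congr 1
      apply List.filter_congr
      intro q hq
      have hqx : q ≠ h := fun e => hxt (e ▸ hq)
      simp [hqx]
    · have hxt : x ∈ t := by
        rcases List.mem_cons.mp hmem with e | hm
        · exact absurd e.symm hhx
        · exact hm
      have hbf : decide (pvKey x < pvKey h) = false := by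
        have := hht x hxt
        simp only [decide_eq_false_iff_not]
        omega
      by_cases hcu : h ∈ u
      · rw [List.filter_cons_of_pos (pv_contains_true hcu),
            List.filter_cons_of_pos (by simp [hcu]),
            pv_insertBy_cons, if_neg (pv_not_true hbf), ih hpt hxt]
      · rw [List.filter_cons_of_neg (by simp [hcu]),
            List.filter_cons_of_neg (by simp [hcu, hhx]),
            ih hpt hxt]

-- the stable sort equals "priorities first, rest in input order"
theorem pv_sorted_eq (u : List String) (hu : u.Nodup) :
    PySem.List.sorted u pvKey false
      = pvL.filter (fun q => u.contains q)
        ++ u.filter (fun w => !priority_categories_py.contains w) := by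
  induction u using List.reverseRecOn with
  | nil =>
    rw [show PySem.List.sorted ([] : List String) pvKey false = [] from rfl]
    simp
  | append_singleton u x ih =>
    have hu' : u.Nodup := (List.nodup_append.mp hu).1
    have hxu : x ∉ u := by
      intro hm
      rcases List.nodup_append.mp hu with ⟨_, _, hdisj⟩
      exact hdisj x hm x (by simp) rfl
    rw [PySem.List.sorted_eq_foldl_insertBy, List.foldl_append, List.foldl_cons, List.foldl_nil,
        ← PySem.List.sorted_eq_foldl_insertBy, ih hu']
    by_cases hc : priority_categories_py.contains x = true
    · have hkx : pvKey x < pvN := pv_key_lt_of_mem x hc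
      have hq : ∀ q ∈ u.filter (fun w => !priority_categories_py.contains w),
          (fun a b => decide (pvKey a < pvKey b)) x q = true := by
        intro q hq
        have hnc : priority_categories_py.contains q = false := by
          have := (List.mem_filter.mp hq).2
          simpa using this
        simp only [decide_eq_true_eq]
        rw [pv_key_of_not_mem q hnc]
        exact hkx
      rw [pv_insertBy_split _ x _ _ hq,
          pv_insert_filter x u hxu pvL pv_pairwise
            ((pv_mem_dd priority_categories_py x).mpr (List.contains_iff_mem.mp hc)),
          List.filter_append]
      simp [List.contains_iff_mem.mp hc]
    · have hcf : priority_categories_py.contains x = false := by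
        cases hv : priority_categories_py.contains x with
        | false => rfl
        | true => exact absurd hv hc
      have hkx : pvKey x = pvN := pv_key_of_not_mem x hcf
      have hall : ∀ y ∈ pvL.filter (fun q => u.contains q)
            ++ u.filter (fun w => !priority_categories_py.contains w),
          (fun a b => decide (pvKey a < pvKey b)) x y = false := by
        intro y hy
        simp only [decide_eq_false_iff_not]
        rcases List.mem_append.mp hy with hl | hr
        · have hyP : y ∈ priority_categories_py :=
            (pv_mem_dd priority_categories_py y).mp (List.mem_filter.mp hl).1
          have := pv_key_lt_of_mem y (pv_contains_true hyP)
          omega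
        · have hnc : priority_categories_py.contains y = false := by
            have := (List.mem_filter.mp hr).2
            simpa using this
          rw [hkx, pv_key_of_not_mem y hnc]
          omega
      rw [PySem.List.insertBy_of_forall_not_before _ x _ hall, List.filter_append]
      have h1 : pvL.filter (fun q => (u ++ [x]).contains q)
          = pvL.filter (fun q => u.contains q) := by
        apply List.filter_congr
        intro q hq
        have hqP : q ∈ priority_categories_py := (pv_mem_dd priority_categories_py q).mp hq
        have hqxne : q ≠ x := fun e => hc (pv_contains_true (e ▸ hqP))
        simp [hqxne]
      rw [h1]
      have hxP : x ∉ priority_categories_py := fun hm => hc (pv_contains_true hm)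
      simp [hxP, List.append_assoc]

-- A's filtering loop builds exactly filter-then-map of B
theorem pv_stepA (acc : List String) (word : String) :
    (if PySem.Str.len word < 2 ∨ PySem.Str.len word > 50 then acc
     else if ¬ (word.toList.any PySem.Chars.isalpha) then acc
     else if PySem.Str.strIsdigit word then acc
     else if PySem.Str.strIsalnum (PySem.Str.replace (PySem.Str.replace word "-" "") "_" "") then
       acc ++ [PySem.Str.lower word]
     else acc)
    = if pv_keep word = true then acc ++ [PySem.Str.lower word] else acc := by
  by_cases hk : pv_keep word = true
  · rw [if_pos hk]
    have hsplit := hk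
    unfold pv_keep at hsplit
    simp only [Bool.and_eq_true, decide_eq_true_eq, Bool.not_eq_true'] at hsplit
    obtain ⟨⟨⟨⟨h2, h50⟩, halpha⟩, hdig⟩, halnum⟩ := hsplit
    have hdig' : PySem.Chars.strIsdigit word.toList = false := by simpa using hdig
    rw [if_neg (by omega), if_neg (by simp [halpha]), if_neg (by simp [hdig']),
        if_pos halnum]
  · rw [if_neg hk]
    by_cases h1 : PySem.Str.len word < 2 ∨ PySem.Str.len word > 50
    · rw [if_pos h1]
    rw [if_neg h1]
    by_cases h2 : word.toList.any PySem.Chars.isalpha = true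
    · rw [if_neg (by simp [h2])]
      by_cases h3 : PySem.Str.strIsdigit word = true
      · rw [if_pos h3]
      · rw [if_neg h3]
        have h4 : PySem.Str.strIsalnum
            (PySem.Str.replace (PySem.Str.replace word "-" "") "_" "") = false := by
          cases hv : PySem.Str.strIsalnum
              (PySem.Str.replace (PySem.Str.replace word "-" "") "_" "") with
          | false => rfl
          | true =>
            exact absurd (by
              unfold pv_keep
              simp only [Bool.and_eq_true, decide_eq_true_eq, Bool.not_eq_true']
              refine ⟨⟨⟨⟨by omega, by omega⟩, h2⟩, ?_⟩, hv⟩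
              cases hd : PySem.Str.strIsdigit word with
              | false => rfl
              | true => exact absurd hd h3) hk
        have h4' : PySem.Chars.strIsalnum
            (PySem.Chars.replace (PySem.Chars.replace word.toList ['-'] []) ['_'] []) = false := by
          simpa using h4
        rw [if_neg (by simp [h4'])]
    · rw [if_pos (by simp at h2 ⊢; exact h2)]

theorem pv_filterA (words : List String) :
    words.foldl (fun acc word =>
      if PySem.Str.len word < 2 ∨ PySem.Str.len word > 50 then acc
      else if ¬ (word.toList.any PySem.Chars.isalpha) then acc
      else if PySem.Str.strIsdigit word then acc
      else if PySem.Str.strIsalnum (PySem.Str.replace (PySem.Str.replace word "-" "") "_" "") then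
        acc ++ [PySem.Str.lower word]
      else acc) []
    = (words.filter pv_keep).map PySem.Str.lower := by
  rw [show (fun (acc : List String) word =>
      if PySem.Str.len word < 2 ∨ PySem.Str.len word > 50 then acc
      else if ¬ (word.toList.any PySem.Chars.isalpha) then acc
      else if PySem.Str.strIsdigit word then acc
      else if PySem.Str.strIsalnum (PySem.Str.replace (PySem.Str.replace word "-" "") "_" "") then
        acc ++ [PySem.Str.lower word]
      else acc)
    = (fun acc word => if pv_keep word = true then acc ++ [PySem.Str.lower word] else acc) from
    funext fun acc => funext fun w => pv_stepA acc w]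
  rw [PySem.List.foldl_append_if pv_keep PySem.Str.lower words []]
  rfl

-- ===== VERDICT (by name: the statement is the Claim_ definition above) =====
theorem filter_and_clean_words_py_spec : Claim_equal_filter_and_clean_words_py := by
  intro words _
  show filter_and_clean_words_py words = filter_and_clean_words_py_alt words
  unfold filter_and_clean_words_py filter_and_clean_words_py_alt
  dsimp only
  rw [pv_filterA]
  have hnd : (PySem.Set.ofList ((words.filter pv_keep).map PySem.Str.lower)).Nodup :=
    PySem.Set.nodup_ofList _
  rw [pv_Aloop priority_categories_py [] _ hnd]
  dsimp only
  rw [pv_sel_eq_dd priority_categories_py _ hnd]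
  rw [show (fun w => (List.foldl (fun d ip => d.setdefault ip.2 ip.1) PySem.Dict.empty
        (PySem.List.enumerate priority_categories_py)).getD w
        (PySem.List.len priority_categories_py)) = pvKey from rfl]
  rw [pv_sorted_eq _ hnd]
  rw [List.nil_append]
  rfl
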